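-- pv_equiv track=rewrite | github.com/daniel-reich/ubiquitous-fiesta | vq3x6QP77d7Qwe8be_15.py | odd_square_patch
-- ===== SOURCE A (Python) =====
-- def odd_square_patch(lst):
--     row = len(lst); col = len(lst[0]); res = [[0]*col for i in range(row)]; max_res = 0
--     for i in range(row):
--         for j in range(col):
--             if lst[i][j] % 2: lst[i][j] = 1
--             else: lst[i][j] = 0
--     for i in range(row):
--         for j in range(col):
--             if lst[i][j] == 1:
--                 res[i][j] = min(res[i][j-1], res[i-1][j-1], res[i-1][j]) + 1
--                 if res[i][j] > max_res: max_res = res[i][j]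
--     return max_res
-- ===== SOURCE B (Python) =====
-- def odd_square_patch(lst):
--     # same in-place 0/1 rewrite of lst as A (mutation preserved); return value: side of largest all-odd square
--     row = len(lst); col = len(lst[0])
--     for i in range(row):
--         for j in range(col):
--             lst[i][j] = lst[i][j] % 2
--     best = 0
--     k = 1
--     while k <= min(row, col):
--         if any(all(lst[i + a][j + b] for a in range(k) for b in range(k))
--                for i in range(row - k + 1) for j in range(col - k + 1)):
--             best = k
--             k += 1
--         else:
--             break
--     return best
-- ===== Notes on version B (the rewrite author's own statement) =====
-- stated objective: alternative
-- what changed: Replaced the min-of-three-neighbours DP table by an incremental search over the side length k, testing for each k whether some kxk all-odd square exists by direct short-circuit scanning, stopping at the first k with no such square (the in-place 0/1 rewrite of lst is kept so the mutation matches).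
import Mathlib
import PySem

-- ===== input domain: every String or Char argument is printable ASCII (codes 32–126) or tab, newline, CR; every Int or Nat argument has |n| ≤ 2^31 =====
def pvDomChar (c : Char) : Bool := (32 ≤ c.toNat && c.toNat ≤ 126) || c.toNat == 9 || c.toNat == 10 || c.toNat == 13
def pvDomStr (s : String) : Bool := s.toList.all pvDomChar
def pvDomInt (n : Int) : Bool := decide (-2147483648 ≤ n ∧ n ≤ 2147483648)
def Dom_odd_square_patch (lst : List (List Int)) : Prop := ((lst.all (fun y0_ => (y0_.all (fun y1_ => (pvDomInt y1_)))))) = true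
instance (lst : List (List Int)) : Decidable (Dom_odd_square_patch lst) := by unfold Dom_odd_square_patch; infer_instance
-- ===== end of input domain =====

-- B replaces A's min-of-three-neighbours DP by an incremental search over the side length k
-- (direct short-circuit scan for an all-odd k×k square, stop at the first k without one);
-- both versions rewrite lst to 0/1 in place identically — the equivalence proved is about the return value.

-- ===== PORT A =====
-- lst[i][j] read / write (indices may be negative, Python semantics)
def pvGet2 (m : List (List Int)) (i j : Int) : Int :=
  PySem.List.pyGetD (PySem.List.pyGetD m i []) j 0

def pvSet2 (m : List (List Int)) (i j : Int) (v : Int) : List (List Int) :=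
  PySem.List.pySetD m i (PySem.List.pySetD (PySem.List.pyGetD m i []) j v)

def odd_square_patch (lst : List (List Int)) : Int :=
  let row : Int := lst.length
  let col : Int := ((PySem.List.pyGetD lst 0 []).length : Int)
  -- first pass: lst[i][j] = 1 if lst[i][j] % 2 else 0
  let lst1 := (PySem.List.pyRange 0 row 1).foldl (fun m i =>
    (PySem.List.pyRange 0 col 1).foldl (fun m j =>
      if PySem.Int.mod (pvGet2 m i j) 2 ≠ 0 then pvSet2 m i j 1 else pvSet2 m i j 0) m) lst
  -- second pass: DP over res with max_res
  let st := (PySem.List.pyRange 0 row 1).foldl (fun st i =>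
    (PySem.List.pyRange 0 col 1).foldl (fun (st : List (List Int) × Int) j =>
      if pvGet2 lst1 i j == 1 then
        let v := min (pvGet2 st.1 i (j-1)) (min (pvGet2 st.1 (i-1) (j-1)) (pvGet2 st.1 (i-1) j)) + 1
        (pvSet2 st.1 i j v, if v > st.2 then v else st.2)
      else st) st)
    ((List.replicate lst.length (List.replicate (PySem.List.pyGetD lst 0 []).length (0:Int)), (0:Int)) : List (List Int) × Int)
  st.2

-- ===== PORT B =====
-- does some all-odd (entry ≠ 0 after the rewrite) k×k square exist?  (any/all with short-circuit)
def pvFound (m : List (List Int)) (row col k : Int) : Bool :=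
  (PySem.List.pyRange 0 (row - k + 1) 1).any (fun i =>
    (PySem.List.pyRange 0 (col - k + 1) 1).any (fun j =>
      (PySem.List.pyRange 0 k 1).all (fun a =>
        (PySem.List.pyRange 0 k 1).all (fun b => pvGet2 m (i + a) (j + b) != 0))))

-- the while-loop: k grows while a k×k all-odd square exists, best = last successful k
def pvSearch (m : List (List Int)) (row col k best : Int) : Int :=
  if _h : k ≤ min row col then
    if pvFound m row col k then pvSearch m row col (k + 1) k else best
  else best
termination_by (min row col + 1 - k).toNat
decreasing_by omega

def odd_square_patch_alt (lst : List (List Int)) : Int :=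
  let row : Int := lst.length
  let col : Int := ((PySem.List.pyGetD lst 0 []).length : Int)
  -- same in-place rewrite as A: lst[i][j] = lst[i][j] % 2
  let lst1 := (PySem.List.pyRange 0 row 1).foldl (fun m i =>
    (PySem.List.pyRange 0 col 1).foldl (fun m j =>
      pvSet2 m i j (PySem.Int.mod (pvGet2 m i j) 2)) m) lst
  pvSearch lst1 row col 1 0

-- ===== PRECONDITION & SPEC =====
-- Pre_ excludes exactly the inputs on which A raises IndexError: the empty list (lst[0]),
-- and ragged inputs where some row is shorter than row 0 (lst[i][j] for j < len(lst[0])).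
def Pre_odd_square_patch (lst : List (List Int)) : Prop :=
  lst ≠ [] ∧ ∀ r ∈ lst, (lst.headD []).length ≤ r.length

instance (lst : List (List Int)) : Decidable (Pre_odd_square_patch lst) := by
  unfold Pre_odd_square_patch; infer_instance

def pvWitness_odd_square_patch : List (List Int) := [[1, 3], [5, 2]]

def Spec_odd_square_patch (lst : List (List Int)) (out : Int) : Prop := out = odd_square_patch_alt lst
instance (lst : List (List Int)) (out : Int) : Decidable (Spec_odd_square_patch lst out) := by unfold Spec_odd_square_patch; infer_instance

-- ===== CLAIM (what is proved, stated in full; the proofs are below) =====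
def Claim_equal_odd_square_patch : Prop := ∀ (lst : List (List Int)), Dom_odd_square_patch lst → Pre_odd_square_patch lst → Spec_odd_square_patch lst (odd_square_patch lst)

-- ===== LEMMAS AND PROOFS =====

-- abstract description: is the original entry (i, j) inside the grid and odd?
def pvOdd (g : List (List Int)) (i j : Int) : Bool :=
  decide (0 ≤ i ∧ i < (g.length : Int) ∧ 0 ≤ j ∧ j < ((g.headD []).length : Int))
    && decide (PySem.Int.mod (pvGet2 g i j) 2 ≠ 0)

-- side of the largest all-odd square with bottom-right corner (i, j)
def pvD (g : List (List Int)) (i j : Int) : Nat :=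
  if h : pvOdd g i j = true then
    1 + min (pvD g i (j - 1)) (min (pvD g (i - 1) (j - 1)) (pvD g (i - 1) j))
  else 0
termination_by (i + j + 1).toNat
decreasing_by
  all_goals
    simp only [pvOdd, Bool.and_eq_true, decide_eq_true_eq] at h
    omega

-- all-odd square of side k with bottom-right corner (i, j)
def pvSq (g : List (List Int)) (i j : Int) (k : Nat) : Prop :=
  ∀ a b : Nat, a < k → b < k → pvOdd g (i - a) (j - b) = true

lemma pvD_eq (g : List (List Int)) (i j : Int) :
    pvD g i j = if pvOdd g i j = true then
      1 + min (pvD g i (j - 1)) (min (pvD g (i - 1) (j - 1)) (pvD g (i - 1) j)) else 0 := by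
  rw [pvD]; split <;> simp_all

lemma pvD_of_not_odd (g : List (List Int)) (i j : Int) (h : ¬ pvOdd g i j = true) :
    pvD g i j = 0 := by rw [pvD_eq]; simp [h]

lemma pvOdd_bounds (g : List (List Int)) (i j : Int) (h : pvOdd g i j = true) :
    0 ≤ i ∧ i < (g.length : Int) ∧ 0 ≤ j ∧ j < ((g.headD []).length : Int) := by
  simp only [pvOdd, Bool.and_eq_true, decide_eq_true_eq] at h; exact h.1

lemma pvSq_succ (g : List (List Int)) (i j : Int) (k : Nat) :
    pvSq g i j (k + 1) ↔ pvOdd g i j = true ∧ pvSq g i (j - 1) k ∧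
      pvSq g (i - 1) (j - 1) k ∧ pvSq g (i - 1) j k := by
  constructor
  · intro h
    refine ⟨by simpa using h 0 0 (by omega) (by omega), ?_, ?_, ?_⟩
    · intro a b ha hb
      have e : j - 1 - (b : Int) = j - ((b + 1 : Nat) : Int) := by push_cast; ring
      rw [e]; exact h a (b + 1) (by omega) (by omega)
    · intro a b ha hb
      have e1 : i - 1 - (a : Int) = i - ((a + 1 : Nat) : Int) := by push_cast; ring
      have e2 : j - 1 - (b : Int) = j - ((b + 1 : Nat) : Int) := by push_cast; ring
      rw [e1, e2]; exact h (a + 1) (b + 1) (by omega) (by omega)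
    · intro a b ha hb
      have e1 : i - 1 - (a : Int) = i - ((a + 1 : Nat) : Int) := by push_cast; ring
      rw [e1]; exact h (a + 1) b (by omega) (by omega)
  · rintro ⟨h0, h1, h2, h3⟩ a b ha hb
    rcases Nat.eq_zero_or_pos a with rfl | hap
    · rcases Nat.eq_zero_or_pos b with rfl | hbp
      · simpa using h0
      · have e : j - (b : Int) = j - 1 - ((b - 1 : Nat) : Int) := by omega
        rw [e]; exact h1 0 (b - 1) (by omega) (by omega)
    · rcases Nat.eq_zero_or_pos b with rfl | hbp
      · have e : i - (a : Int) = i - 1 - ((a - 1 : Nat) : Int) := by omega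
        rw [e]; exact h3 (a - 1) 0 (by omega) (by omega)
      · have e1 : i - (a : Int) = i - 1 - ((a - 1 : Nat) : Int) := by omega
        have e2 : j - (b : Int) = j - 1 - ((b - 1 : Nat) : Int) := by omega
        rw [e1, e2]; exact h2 (a - 1) (b - 1) (by omega) (by omega)

lemma pvSq_iff_le_pvD' (g : List (List Int)) (k : Nat) :
    ∀ i j : Int, pvSq g i j k ↔ k ≤ pvD g i j := by
  induction k with
  | zero => intro i j; simp [pvSq]
  | succ k ih =>
    intro i j
    rw [pvSq_succ, ih i (j-1), ih (i-1) (j-1), ih (i-1) j, pvD_eq g i j]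
    by_cases h : pvOdd g i j = true <;> simp [h]
    omega

-- ---------- generic fold machinery ----------

lemma pvRange_nat (n : Nat) :
    PySem.List.pyRange 0 (n : Int) 1 = (List.range' 0 n).map (fun k : Nat => (k : Int)) := by
  rw [PySem.List.pyRange_zero_nat, List.range_eq_range']

lemma pvGetD_map_range {α : Type} (n : Nat) (f : Nat → α) (a : Nat) (d : α) :
    (((List.range n).map f).getD a d) = if a < n then f a else d := by
  by_cases h : a < n
  · rw [List.getD_eq_getElem _ _ (by simpa using h)]
    simp [h]
  · rw [List.getD_eq_default _ _ (by simpa using h)]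
    simp [h]

lemma pvGetD_set {α : Type} (r : List α) (a t : Nat) (v : α) (d : α) (ha : a < r.length) :
    (r.set a v).getD t d = if t = a then v else r.getD t d := by
  by_cases ht : t < r.length
  · rw [List.getD_eq_getElem _ _ (by simpa using ht)]
    simp only [List.getElem_set]
    by_cases hta : a = t
    · subst hta; simp
    · rw [if_neg hta, if_neg (fun h => hta h.symm), List.getD_eq_getElem _ _ ht]
  · rw [List.getD_eq_default _ _ (by simpa using ht), List.getD_eq_default _ _ (by omega)]
    rw [if_neg (by omega)]

-- one in-place pass 'for t in range(a, a+k): xs[t] = f(xs[t])', described pointwise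
lemma pvPassAux {α : Type} (d : α) (F : List α → Nat → List α) (f : α → α)
    (hF : ∀ acc j, j < acc.length → F acc j = acc.set j (f (acc.getD j d))) :
    ∀ (k a : Nat) (r : List α), a + k ≤ r.length →
      ((List.range' a k).foldl F r).length = r.length ∧
      ∀ t : Nat, ((List.range' a k).foldl F r).getD t d =
        if a ≤ t ∧ t < a + k then f (r.getD t d) else r.getD t d := by
  intro k
  induction k with
  | zero =>
    intro a r h
    refine ⟨by simp, fun t => ?_⟩
    simp only [List.range'_zero, List.foldl_nil]
    rw [if_neg (by omega)]
  | succ k ih =>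
    intro a r h
    have ha : a < r.length := by omega
    rw [List.range'_succ, List.foldl_cons, hF r a ha]
    have hlen : (r.set a (f (r.getD a d))).length = r.length := by simp
    obtain ⟨l1, l2⟩ := ih (a + 1) (r.set a (f (r.getD a d))) (by omega)
    refine ⟨by rw [l1, hlen], ?_⟩
    intro t
    rw [l2 t]
    have hset : ∀ t : Nat, (r.set a (f (r.getD a d))).getD t d =
        if t = a then f (r.getD a d) else r.getD t d := fun t => pvGetD_set r a t _ d ha
    simp only [hset]
    by_cases hta : t = a
    · subst hta
      rw [if_neg (by omega), if_pos rfl, if_pos (by omega)]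
    · rw [if_neg hta]
      by_cases hr : a + 1 ≤ t ∧ t < a + 1 + k
      · rw [if_pos hr, if_pos (by omega)]
      · rw [if_neg hr, if_neg (by omega)]

-- a loop that only touches row i, commuted to an update of row i
lemma pvRowFold (f : Int → Int) (L : List Int) (i : Nat) :
    ∀ (m : List (List Int)), i < m.length →
    L.foldl (fun acc j => pvSet2 acc (i : Int) j (f (pvGet2 acc (i : Int) j))) m
      = m.set i (L.foldl (fun r j => PySem.List.pySetD r j (f (PySem.List.pyGetD r j 0)))
          (m.getD i [])) := by
  induction L with
  | nil =>
    intro m hi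
    simp only [List.foldl_nil]
    rw [List.getD_eq_getElem _ _ hi, List.set_getElem_self]
  | cons j L ih =>
    intro m hi
    simp only [List.foldl_cons]
    have e2 : pvSet2 m (i : Int) j (f (pvGet2 m (i : Int) j))
        = m.set i (PySem.List.pySetD (m.getD i []) j (f (PySem.List.pyGetD (m.getD i []) j 0))) := by
      simp [pvSet2, pvGet2]
    rw [e2, ih _ (by simpa using hi), List.set_set]
    congr 1
    rw [List.getD_eq_getElem _ _ (by simpa using hi)]
    simp

-- generic fold invariant over range'
lemma pvFoldInv {σ : Type} (F : σ → Nat → σ) (P : Nat → σ → Prop) :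
    ∀ (k a : Nat) (s : σ),
      (∀ t s', a ≤ t → t < a + k → P t s' → P (t + 1) (F s' t)) →
      P a s → P (a + k) ((List.range' a k).foldl F s) := by
  intro k
  induction k with
  | zero => intro a s _ hs; simpa using hs
  | succ k ih =>
    intro a s hstep hs
    rw [List.range'_succ, List.foldl_cons]
    have := ih (a + 1) (F s a) (fun t s' h1 h2 h3 => hstep t s' (by omega) (by omega) h3)
      (hstep a s (by omega) (by omega) hs)
    have e : a + 1 + k = a + (k + 1) := by omega
    rwa [e] at this

-- ---------- first pass (the in-place 0/1 rewrite) ----------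

def pvPass1 (g : List (List Int)) (f : Int → Int) (c : Nat) : List (List Int) :=
  (PySem.List.pyRange 0 (g.length : Int) 1).foldl (fun m i =>
    (PySem.List.pyRange 0 (c : Int) 1).foldl (fun m j => pvSet2 m i j (f (pvGet2 m i j))) m) g

def pvRowT (f : Int → Int) (c : Nat) (r : List Int) : List Int :=
  (PySem.List.pyRange 0 (c : Int) 1).foldl
    (fun r j => PySem.List.pySetD r j (f (PySem.List.pyGetD r j 0))) r

lemma pvRowT_spec (f : Int → Int) (c : Nat) (r : List Int) (hc : c ≤ r.length) :
    (pvRowT f c r).length = r.length ∧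
    ∀ t : Nat, (pvRowT f c r).getD t 0 = if t < c then f (r.getD t 0) else r.getD t 0 := by
  unfold pvRowT
  rw [pvRange_nat c, List.foldl_map]
  obtain ⟨l1, l2⟩ := pvPassAux (0 : Int)
    (fun acc k => PySem.List.pySetD acc (k : Int) (f (PySem.List.pyGetD acc (k : Int) 0))) f
    (by intro acc j hj; simp) c 0 r (by omega)
  refine ⟨l1, fun t => ?_⟩
  rw [l2 t]
  by_cases h : t < c
  · rw [if_pos (by omega), if_pos h]
  · rw [if_neg (by omega), if_neg h]

lemma pvPass1_spec (g : List (List Int)) (f : Int → Int) (c : Nat) :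
    (pvPass1 g f c).length = g.length ∧
    ∀ i : Nat, i < g.length → (pvPass1 g f c).getD i [] = pvRowT f c (g.getD i []) := by
  unfold pvPass1
  rw [pvRange_nat g.length, List.foldl_map]
  obtain ⟨l1, l2⟩ := pvPassAux ([] : List Int)
    (fun (m : List (List Int)) (i : Nat) =>
      (PySem.List.pyRange 0 (c : Int) 1).foldl (fun m j => pvSet2 m (i : Int) j (f (pvGet2 m (i : Int) j))) m)
    (pvRowT f c)
    (by intro acc i hi; exact pvRowFold f _ i acc hi) g.length 0 g (by omega)
  refine ⟨l1, fun i hi => ?_⟩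
  rw [l2 i, if_pos (by omega)]

-- the A-step (write 1 or 0) and the B-step (write x % 2) are the same update
lemma pvStepAB (m : List (List Int)) (i j : Int) :
    (if PySem.Int.mod (pvGet2 m i j) 2 ≠ 0 then pvSet2 m i j 1 else pvSet2 m i j 0)
      = pvSet2 m i j (PySem.Int.mod (pvGet2 m i j) 2) := by
  have h2 : PySem.Int.mod (pvGet2 m i j) 2 = (pvGet2 m i j) % 2 :=
    PySem.Int.mod_eq_emod_of_pos (by omega)
  rcases Int.emod_two_eq_zero_or_one (pvGet2 m i j) with h | h
  · rw [if_neg (by rw [h2, h]; simp), h2, h]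
  · rw [if_pos (by rw [h2, h]; omega), h2, h]

-- entries of the cleaned matrix are 1 on odd cells, 0 on even cells (inside the grid)
lemma pvClean_entry (g : List (List Int)) (hlen : ∀ r ∈ g, (g.headD []).length ≤ r.length)
    (i j : Nat) (hi : i < g.length) (hj : j < (g.headD []).length) :
    pvGet2 (pvPass1 g (fun x => PySem.Int.mod x 2) (g.headD []).length) (i : Int) (j : Int)
      = if pvOdd g (i : Int) (j : Int) then 1 else 0 := by
  obtain ⟨l1, l2⟩ := pvPass1_spec g (fun x => PySem.Int.mod x 2) (g.headD []).length
  have hrow : (g.getD i []) ∈ g := by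
    rw [List.getD_eq_getElem _ _ hi]; exact List.getElem_mem hi
  obtain ⟨r1, r2⟩ := pvRowT_spec (fun x => PySem.Int.mod x 2) (g.headD []).length (g.getD i [])
    (hlen _ hrow)
  have e0 : pvGet2 (pvPass1 g (fun x => PySem.Int.mod x 2) (g.headD []).length) (i : Int) (j : Int)
      = (pvRowT (fun x => PySem.Int.mod x 2) (g.headD []).length (g.getD i [])).getD j 0 := by
    simp only [pvGet2, PySem.List.pyGetD_natCast]
    rw [l2 i hi]
  rw [e0, r2 j, if_pos hj]
  have eg : pvGet2 g (i : Int) (j : Int) = (g.getD i []).getD j 0 := by simp [pvGet2]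
  have hb : decide (0 ≤ (i : Int) ∧ (i : Int) < (g.length : Int) ∧ 0 ≤ (j : Int) ∧
      (j : Int) < ((g.headD []).length : Int)) = true := by
    simp only [decide_eq_true_eq]
    refine ⟨by omega, by exact_mod_cast hi, by omega, by exact_mod_cast hj⟩
  have hodd : pvOdd g (i : Int) (j : Int)
      = decide (PySem.Int.mod ((g.getD i []).getD j 0) 2 ≠ 0) := by
    unfold pvOdd
    rw [eg, hb, Bool.true_and]
  rw [hodd]
  have h2 : PySem.Int.mod ((g.getD i []).getD j 0) 2 = ((g.getD i []).getD j 0) % 2 :=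
    PySem.Int.mod_eq_emod_of_pos (by omega)
  rcases Int.emod_two_eq_zero_or_one ((g.getD i []).getD j 0) with h | h
  · rw [h2, h]; simp
  · rw [h2, h]; simp

-- ---------- the DP table and the loop invariant ----------

def pvDI (g : List (List Int)) (i j : Int) : Int := (pvD g i j : Int)

def pvRes (g : List (List Int)) (i j : Nat) : List (List Int) :=
  (List.range g.length).map (fun a => (List.range (g.headD []).length).map (fun b =>
    if a < i ∨ (a = i ∧ b < j) then pvDI g (a : Int) (b : Int) else 0))

def pvP (g : List (List Int)) (i j : Nat) (mx : Int) : Prop :=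
  0 ≤ mx ∧
  (∀ a b : Nat, b < (g.headD []).length → (a < i ∨ (a = i ∧ b < j)) →
    pvDI g (a : Int) (b : Int) ≤ mx) ∧
  (mx = 0 ∨ ∃ a b : Nat, a < g.length ∧ b < (g.headD []).length ∧
    (a < i ∨ (a = i ∧ b < j)) ∧ pvDI g (a : Int) (b : Int) = mx)

lemma pvDI_nonneg (g : List (List Int)) (i j : Int) : 0 ≤ pvDI g i j := by
  simp [pvDI]

lemma pvDI_of_neg (g : List (List Int)) (i j : Int) (h : i < 0 ∨ j < 0) : pvDI g i j = 0 := by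
  have : pvOdd g i j = false := by
    simp only [pvOdd, Bool.and_eq_false_iff]
    left; simp only [decide_eq_false_iff_not]; omega
  simp [pvDI, pvD_of_not_odd g i j (by simp [this])]

def pvResE (g : List (List Int)) (i j a b : Nat) : Int :=
  if a < i ∨ (a = i ∧ b < j) then pvDI g (a : Int) (b : Int) else 0

lemma pvResE_nonneg (g : List (List Int)) (i j a b : Nat) : 0 ≤ pvResE g i j a b := by
  unfold pvResE; split
  · exact pvDI_nonneg g _ _
  · omega

lemma pvRes_length (g : List (List Int)) (i j : Nat) : (pvRes g i j).length = g.length := by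
  simp [pvRes]

lemma pvRes_rowcast (g : List (List Int)) (i j a : Nat) (ha : a < g.length) :
    PySem.List.pyGetD (pvRes g i j) (a : Int) []
      = (List.range (g.headD []).length).map (fun b => pvResE g i j a b) := by
  rw [PySem.List.pyGetD_natCast]
  unfold pvRes
  rw [pvGetD_map_range _ _ a, if_pos ha]
  rfl

lemma pvMapRange_ne_nil {α : Type} (n : Nat) (f : Nat → α) (h : 0 < n) :
    (List.range n).map f ≠ [] := by
  simp [List.map_eq_nil_iff, List.range_eq_nil]; omega

lemma pvMapRange_getLast {α : Type} (n : Nat) (f : Nat → α) (h : (List.range n).map f ≠ []) :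
    ((List.range n).map f).getLast h = f (n - 1) := by
  have hn : 0 < n := by
    by_contra hc
    exact h (by simp only [List.map_eq_nil_iff, List.range_eq_nil]; omega)
  rw [List.getLast_eq_getElem]
  simp

lemma pvRes_row_neg (g : List (List Int)) (i j : Nat) (hR : 0 < g.length) :
    PySem.List.pyGetD (pvRes g i j) (-1) []
      = (List.range (g.headD []).length).map (fun b => pvResE g i j (g.length - 1) b) := by
  have hne : pvRes g i j ≠ [] := by
    intro hc
    have := pvRes_length g i j
    rw [hc] at this
    simp at this; omega
  rw [PySem.List.pyGetD_neg_one _ _ hne]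
  unfold pvRes
  rw [pvMapRange_getLast]
  rfl

lemma pvRow_get_nat (g : List (List Int)) (i j a b : Nat) (hb : b < (g.headD []).length) :
    PySem.List.pyGetD ((List.range (g.headD []).length).map (fun b => pvResE g i j a b)) (b : Int) 0
      = pvResE g i j a b := by
  rw [PySem.List.pyGetD_natCast, pvGetD_map_range, if_pos hb]

lemma pvRow_get_neg (g : List (List Int)) (i j a : Nat) (hC : 0 < (g.headD []).length) :
    PySem.List.pyGetD ((List.range (g.headD []).length).map (fun b => pvResE g i j a b)) (-1) 0
      = pvResE g i j a ((g.headD []).length - 1) := by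
  rw [PySem.List.pyGetD_neg_one _ _ (pvMapRange_ne_nil _ _ hC), pvMapRange_getLast]

-- the three neighbour reads agree with the boundary-0 convention as far as the min is concerned
lemma pvMin3 (g : List (List Int)) (i j : Nat) (hi : i < g.length) (hj : j < (g.headD []).length) :
    min (pvGet2 (pvRes g i j) (i : Int) ((j : Int) - 1))
      (min (pvGet2 (pvRes g i j) ((i : Int) - 1) ((j : Int) - 1))
           (pvGet2 (pvRes g i j) ((i : Int) - 1) (j : Int)))
    = min (pvDI g (i : Int) ((j : Int) - 1))
      (min (pvDI g ((i : Int) - 1) ((j : Int) - 1)) (pvDI g ((i : Int) - 1) (j : Int))) := by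
  have hR : 0 < g.length := by omega
  have hC : 0 < (g.headD []).length := by omega
  -- row handles
  have hrow_i := pvRes_rowcast g i j i hi
  have hrow_neg := pvRes_row_neg g i j hR
  by_cases hj0 : j = 0
  · -- r1 and D1 are both 0; everything else is nonnegative
    subst hj0
    have ej : ((0 : Nat) : Int) - 1 = -1 := by norm_num
    have r1 : pvGet2 (pvRes g i 0) (i : Int) (((0 : Nat) : Int) - 1) = pvResE g i 0 i ((g.headD []).length - 1) := by
      rw [ej]; unfold pvGet2; rw [hrow_i, pvRow_get_neg g i 0 i hC]
    have e1 : pvResE g i 0 i ((g.headD []).length - 1) = 0 := by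
      unfold pvResE; rw [if_neg (by omega)]
    have hD1 : pvDI g (i : Int) (((0 : Nat) : Int) - 1) = 0 := pvDI_of_neg g _ _ (by omega)
    -- remaining reads are nonnegative
    by_cases hi0 : i = 0
    · subst hi0
      have r2 : pvGet2 (pvRes g 0 0) (((0 : Nat) : Int) - 1) (((0 : Nat) : Int) - 1)
          = pvResE g 0 0 (g.length - 1) ((g.headD []).length - 1) := by
        rw [ej]; unfold pvGet2; rw [hrow_neg, pvRow_get_neg g 0 0 _ hC]
      have r3 : pvGet2 (pvRes g 0 0) (((0 : Nat) : Int) - 1) ((0 : Nat) : Int)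
          = pvResE g 0 0 (g.length - 1) 0 := by
        rw [ej]; unfold pvGet2; rw [hrow_neg, pvRow_get_nat g 0 0 _ 0 hC]
      rw [r1, e1, hD1, r2, r3]
      have n2 := pvResE_nonneg g 0 0 (g.length - 1) ((g.headD []).length - 1)
      have n3 := pvResE_nonneg g 0 0 (g.length - 1) 0
      have n2' := pvDI_nonneg g (((0 : Nat) : Int) - 1) (((0 : Nat) : Int) - 1)
      have n3' := pvDI_nonneg g (((0 : Nat) : Int) - 1) ((0 : Nat) : Int)
      omega
    · have ei : ((i : Int) - 1) = ((i - 1 : Nat) : Int) := by omega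
      have r2 : pvGet2 (pvRes g i 0) ((i : Int) - 1) (((0 : Nat) : Int) - 1)
          = pvResE g i 0 (i - 1) ((g.headD []).length - 1) := by
        rw [ej, ei]; unfold pvGet2
        rw [pvRes_rowcast g i 0 (i - 1) (by omega), pvRow_get_neg g i 0 _ hC]
      have r3 : pvGet2 (pvRes g i 0) ((i : Int) - 1) ((0 : Nat) : Int)
          = pvResE g i 0 (i - 1) 0 := by
        rw [ei]; unfold pvGet2
        rw [pvRes_rowcast g i 0 (i - 1) (by omega), pvRow_get_nat g i 0 _ 0 hC]
      rw [r1, e1, hD1, r2, r3]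
      have n2 := pvResE_nonneg g i 0 (i - 1) ((g.headD []).length - 1)
      have n3 := pvResE_nonneg g i 0 (i - 1) 0
      have n2' := pvDI_nonneg g ((i : Int) - 1) (((0 : Nat) : Int) - 1)
      have n3' := pvDI_nonneg g ((i : Int) - 1) ((0 : Nat) : Int)
      omega
  · -- j ≥ 1
    have hj1 : 1 ≤ j := by omega
    have ej : ((j : Int) - 1) = ((j - 1 : Nat) : Int) := by omega
    have r1 : pvGet2 (pvRes g i j) (i : Int) ((j : Int) - 1) = pvDI g (i : Int) ((j : Int) - 1) := by
      rw [ej]; unfold pvGet2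
      rw [hrow_i, pvRow_get_nat g i j i (j - 1) (by omega)]
      unfold pvResE
      rw [if_pos (by omega)]
    by_cases hi0 : i = 0
    · subst hi0
      have eD2 : pvDI g (((0 : Nat) : Int) - 1) ((j : Int) - 1) = 0 := pvDI_of_neg g _ _ (by omega)
      have eD3 : pvDI g (((0 : Nat) : Int) - 1) (j : Int) = 0 := pvDI_of_neg g _ _ (by omega)
      have r2 : pvGet2 (pvRes g 0 j) (((0 : Nat) : Int) - 1) ((j : Int) - 1)
          = pvResE g 0 j (g.length - 1) (j - 1) := by
        rw [ej]
        have e0 : ((0 : Nat) : Int) - 1 = -1 := by norm_num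
        rw [e0]; unfold pvGet2; rw [hrow_neg, pvRow_get_nat g 0 j _ (j - 1) (by omega)]
      have r3 : pvGet2 (pvRes g 0 j) (((0 : Nat) : Int) - 1) (j : Int)
          = pvResE g 0 j (g.length - 1) j := by
        have e0 : ((0 : Nat) : Int) - 1 = -1 := by norm_num
        rw [e0]; unfold pvGet2; rw [hrow_neg, pvRow_get_nat g 0 j _ j hj]
      have e3 : pvResE g 0 j (g.length - 1) j = 0 := by
        unfold pvResE; rw [if_neg (by omega)]
      by_cases hR1 : g.length = 1
      · -- the wrapped read r2 sees the current row, but the min is 0 on both sides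
        have e2 : pvResE g 0 j (g.length - 1) (j - 1) = pvDI g ((0 : Nat) : Int) ((j : Int) - 1) := by
          unfold pvResE
          rw [if_pos (by omega), ej]
          congr 1
          omega
        rw [r1, r2, r3, e2, e3, eD2, eD3]
        have n1 := pvDI_nonneg g ((0 : Nat) : Int) ((j : Int) - 1)
        omega
      · have e2 : pvResE g 0 j (g.length - 1) (j - 1) = 0 := by
          unfold pvResE; rw [if_neg (by omega)]
        rw [r1, r2, r3, e2, e3, eD2, eD3]
    · have ei : ((i : Int) - 1) = ((i - 1 : Nat) : Int) := by omega
      have r2 : pvGet2 (pvRes g i j) ((i : Int) - 1) ((j : Int) - 1)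
          = pvDI g ((i : Int) - 1) ((j : Int) - 1) := by
        rw [ej, ei]; unfold pvGet2
        rw [pvRes_rowcast g i j (i - 1) (by omega), pvRow_get_nat g i j _ (j - 1) (by omega)]
        unfold pvResE
        rw [if_pos (by omega)]
      have r3 : pvGet2 (pvRes g i j) ((i : Int) - 1) (j : Int)
          = pvDI g ((i : Int) - 1) (j : Int) := by
        rw [ei]; unfold pvGet2
        rw [pvRes_rowcast g i j (i - 1) (by omega), pvRow_get_nat g i j _ j hj]
        unfold pvResE
        rw [if_pos (by omega)]
      rw [r1, r2, r3]

lemma pvRes_getD_row (g : List (List Int)) (i j a : Nat) (ha : a < g.length) :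
    (pvRes g i j).getD a [] = (List.range (g.headD []).length).map (fun b => pvResE g i j a b) := by
  unfold pvRes
  rw [pvGetD_map_range, if_pos ha]
  rfl

lemma pvResEq_of_entry (g : List (List Int)) (i j i' j' : Nat)
    (h : ∀ a b : Nat, a < g.length → b < (g.headD []).length →
      pvResE g i j a b = pvResE g i' j' a b) :
    pvRes g i j = pvRes g i' j' := by
  unfold pvRes
  apply List.map_congr_left
  intro a ha
  rw [List.mem_range] at ha
  apply List.map_congr_left
  intro b hb
  rw [List.mem_range] at hb
  exact h a b ha hb

lemma pvRes_set (g : List (List Int)) (i j : Nat) (hi : i < g.length)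
    (_hj : j < (g.headD []).length) :
    pvSet2 (pvRes g i j) (i : Int) (j : Int) (pvDI g (i : Int) (j : Int)) = pvRes g i (j + 1) := by
  simp only [pvSet2, PySem.List.pyGetD_natCast, PySem.List.pySetD_natCast]
  rw [pvRes_getD_row g i j i hi]
  apply List.ext_getElem
  · simp [pvRes]
  · intro a h1 h2
    have h2' : a < g.length := by simpa [pvRes] using h2
    simp only [pvRes, List.getElem_set, List.getElem_map, List.getElem_range]
    by_cases hai : i = a
    · rw [if_pos hai]
      subst hai
      apply List.ext_getElem
      · simp
      · intro b b1 b2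
        have b2' : b < (g.headD []).length := by simpa using b2
        simp only [List.getElem_set, List.getElem_map, List.getElem_range]
        by_cases hbj : j = b
        · rw [if_pos hbj]
          subst hbj
          split_ifs with hcc
          · rfl
          · exact absurd (Or.inr ⟨trivial, by omega⟩) hcc
        · rw [if_neg hbj]
          simp only [pvResE, lt_self_iff_false, false_or, true_and]
          split_ifs with c1 c2 <;> first | rfl | omega
    · rw [if_neg hai]
      apply List.map_congr_left
      intro b hb
      split_ifs with c1 c2 <;> first | rfl | omega

lemma pvRes_step_zero (g : List (List Int)) (i j : Nat) (h0 : pvDI g (i : Int) (j : Int) = 0) :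
    pvRes g i j = pvRes g i (j + 1) := by
  apply pvResEq_of_entry
  intro a b _ _
  simp only [pvResE]
  by_cases hc : a < i ∨ (a = i ∧ b < j)
  · rw [if_pos hc, if_pos (show a < i ∨ (a = i ∧ b < j + 1) by omega)]
  · by_cases hc2 : a = i ∧ b = j
    · rw [if_neg hc, if_pos (show a < i ∨ (a = i ∧ b < j + 1) by omega)]
      rw [hc2.1, hc2.2, h0]
    · rw [if_neg hc, if_neg (show ¬(a < i ∨ (a = i ∧ b < j + 1)) by omega)]

lemma pvRes_shift (g : List (List Int)) (i : Nat) :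
    pvRes g i (g.headD []).length = pvRes g (i + 1) 0 := by
  apply pvResEq_of_entry
  intro a b _ hb
  simp only [pvResE]
  by_cases hc : a < i + 1
  · rw [if_pos (show a < i ∨ (a = i ∧ b < (g.headD []).length) by omega),
        if_pos (show a < i + 1 ∨ (a = i + 1 ∧ b < 0) by omega)]
  · rw [if_neg (show ¬(a < i ∨ (a = i ∧ b < (g.headD []).length)) by omega),
        if_neg (show ¬(a < i + 1 ∨ (a = i + 1 ∧ b < 0)) by omega)]

lemma pvRes_init (g : List (List Int)) :
    List.replicate g.length (List.replicate (g.headD []).length (0 : Int)) = pvRes g 0 0 := by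
  apply List.ext_getElem
  · simp [pvRes]
  · intro a h1 h2
    rw [List.getElem_replicate]
    unfold pvRes
    have h2' : a < g.length := by simpa [pvRes] using h2
    rw [List.getElem_map, List.getElem_range]
    apply List.ext_getElem
    · simp
    · intro b b1 b2
      rw [List.getElem_replicate, List.getElem_map, List.getElem_range]
      split_ifs with hcc
      · omega
      · rfl

lemma pvP_shift (g : List (List Int)) (i : Nat) (mx : Int) :
    pvP g i (g.headD []).length mx ↔ pvP g (i + 1) 0 mx := by
  unfold pvP
  constructor
  · rintro ⟨h0, h1, h2⟩
    refine ⟨h0, fun a b hb hc => h1 a b hb (by omega), ?_⟩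
    rcases h2 with h2 | ⟨a, b, ha, hb, hc, he⟩
    · exact Or.inl h2
    · exact Or.inr ⟨a, b, ha, hb, by omega, he⟩
  · rintro ⟨h0, h1, h2⟩
    refine ⟨h0, fun a b hb hc => h1 a b hb (by omega), ?_⟩
    rcases h2 with h2 | ⟨a, b, ha, hb, hc, he⟩
    · exact Or.inl h2
    · exact Or.inr ⟨a, b, ha, hb, by omega, he⟩

lemma pvDI_odd (g : List (List Int)) (i j : Int) (h : pvOdd g i j = true) :
    pvDI g i j = min (pvDI g i (j - 1)) (min (pvDI g (i - 1) (j - 1)) (pvDI g (i - 1) j)) + 1 := by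
  unfold pvDI
  rw [pvD_eq, if_pos h]
  push_cast
  omega

-- one cell of the DP loop
def pvM (st : (List (List Int)) × Int) (i j : Int) : Int :=
  min (pvGet2 st.1 i (j - 1)) (min (pvGet2 st.1 (i - 1) (j - 1)) (pvGet2 st.1 (i - 1) j))

def pvStep (L1 : List (List Int)) (st : (List (List Int)) × Int) (i j : Int) :
    (List (List Int)) × Int :=
  if pvGet2 L1 i j == 1 then
    (pvSet2 st.1 i j (pvM st i j + 1), if pvM st i j + 1 > st.2 then pvM st i j + 1 else st.2)
  else st

lemma pvCellStep (g : List (List Int)) (hlen : ∀ r ∈ g, (g.headD []).length ≤ r.length)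
    (i j : Nat) (hi : i < g.length) (hj : j < (g.headD []).length) (mx : Int)
    (hP : pvP g i j mx) :
    ∃ mx', pvStep (pvPass1 g (fun x => PySem.Int.mod x 2) (g.headD []).length)
        (pvRes g i j, mx) (i : Int) (j : Int) = (pvRes g i (j + 1), mx') ∧ pvP g i (j + 1) mx' := by
  have hmin := pvMin3 g i j hi hj
  have hclean := pvClean_entry g hlen i j hi hj
  unfold pvStep pvM
  dsimp only
  by_cases hodd : pvOdd g (i : Int) (j : Int) = true
  · have hv : (min (pvGet2 (pvRes g i j) (i : Int) ((j : Int) - 1))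
        (min (pvGet2 (pvRes g i j) ((i : Int) - 1) ((j : Int) - 1))
             (pvGet2 (pvRes g i j) ((i : Int) - 1) (j : Int))) + 1) = pvDI g (i : Int) (j : Int) := by
      rw [hmin, ← pvDI_odd g _ _ hodd]
    have hcond : (pvGet2 (pvPass1 g (fun x => PySem.Int.mod x 2) (g.headD []).length) (i : Int) (j : Int) == 1) = true := by
      rw [hclean, if_pos hodd]; rfl
    rw [hcond]
    simp only [if_true]
    rw [hv, pvRes_set g i j hi hj]
    refine ⟨_, rfl, ?_⟩
    obtain ⟨p0, p1, p2⟩ := hP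
    by_cases hgt : pvDI g (i : Int) (j : Int) > mx
    · rw [if_pos hgt]
      refine ⟨le_trans p0 (by omega), ?_, ?_⟩
      · intro a b hb hc
        by_cases hab : a = i ∧ b = j
        · rw [hab.1, hab.2]
        · have := p1 a b hb (by omega)
          omega
      · exact Or.inr ⟨i, j, hi, hj, by omega, rfl⟩
    · rw [if_neg hgt]
      refine ⟨p0, ?_, ?_⟩
      · intro a b hb hc
        by_cases hab : a = i ∧ b = j
        · rw [hab.1, hab.2]; omega
        · exact p1 a b hb (by omega)
      · rcases p2 with p2 | ⟨a, b, ha, hb, hc, he⟩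
        · exact Or.inl p2
        · exact Or.inr ⟨a, b, ha, hb, by omega, he⟩
  · have h0 : pvDI g (i : Int) (j : Int) = 0 := by
      unfold pvDI
      rw [pvD_of_not_odd g _ _ hodd]
      rfl
    have hcond : (pvGet2 (pvPass1 g (fun x => PySem.Int.mod x 2) (g.headD []).length) (i : Int) (j : Int) == 1) = false := by
      rw [hclean, if_neg hodd]; rfl
    rw [hcond]
    simp only [Bool.false_eq_true, if_false]
    rw [pvRes_step_zero g i j h0]
    refine ⟨mx, rfl, ?_⟩
    obtain ⟨p0, p1, p2⟩ := hP
    refine ⟨p0, ?_, ?_⟩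
    · intro a b hb hc
      by_cases hab : a = i ∧ b = j
      · rw [hab.1, hab.2, h0]; exact p0
      · exact p1 a b hb (by omega)
    · rcases p2 with p2 | ⟨a, b, ha, hb, hc, he⟩
      · exact Or.inl p2
      · exact Or.inr ⟨a, b, ha, hb, by omega, he⟩

-- the whole DP phase of A
def pvDP (L1 : List (List Int)) (R C : Nat) : (List (List Int)) × Int :=
  (PySem.List.pyRange 0 (R : Int) 1).foldl (fun st i =>
    (PySem.List.pyRange 0 (C : Int) 1).foldl (fun st j => pvStep L1 st i j) st)
    (List.replicate R (List.replicate C (0 : Int)), (0 : Int))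

lemma pvP_init (g : List (List Int)) : pvP g 0 0 0 := by
  refine ⟨le_refl 0, ?_, Or.inl rfl⟩
  intro a b _ hc
  exfalso; omega

lemma pvDP_val (g : List (List Int)) (hlen : ∀ r ∈ g, (g.headD []).length ≤ r.length) :
    pvP g g.length 0
      (pvDP (pvPass1 g (fun x => PySem.Int.mod x 2) (g.headD []).length)
        g.length (g.headD []).length).2 := by
  unfold pvDP
  rw [pvRange_nat g.length, List.foldl_map]
  have H := pvFoldInv
    (fun st (i : Nat) => (PySem.List.pyRange 0 ((g.headD []).length : Int) 1).foldl
      (fun st j => pvStep (pvPass1 g (fun x => PySem.Int.mod x 2) (g.headD []).length) st (i : Int) j) st)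
    (fun t s => s.1 = pvRes g t 0 ∧ pvP g t 0 s.2)
    g.length 0
    ((List.replicate g.length (List.replicate (g.headD []).length (0 : Int)), (0 : Int)))
    ?_ ?_
  · simp only [Nat.zero_add] at H
    exact H.2
  · -- outer step
    intro t s' ht1 ht2 hP'
    obtain ⟨s1, s2⟩ := s'
    obtain ⟨e1, e2⟩ := hP'
    dsimp only at e1 e2 ⊢
    subst e1
    rw [pvRange_nat (g.headD []).length, List.foldl_map]
    have HI := pvFoldInv
      (fun st (j : Nat) => pvStep (pvPass1 g (fun x => PySem.Int.mod x 2) (g.headD []).length) st (t : Int) (j : Int))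
      (fun u s => s.1 = pvRes g t u ∧ pvP g t u s.2)
      (g.headD []).length 0 (pvRes g t 0, s2)
      ?_ ⟨rfl, e2⟩
    · simp only [Nat.zero_add] at HI
      obtain ⟨f1, f2⟩ := HI
      constructor
      · rw [f1]
        exact pvRes_shift g t
      · exact (pvP_shift g t _).mp f2
    · -- inner step
      intro u s'' hu1 hu2 hP''
      obtain ⟨r1, r2⟩ := s''
      obtain ⟨e1', e2'⟩ := hP''
      dsimp only at e1' e2' ⊢
      subst e1'
      obtain ⟨mx', heq, hp'⟩ := pvCellStep g hlen t u (by omega) (by omega) r2 e2'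
      rw [heq]
      exact ⟨rfl, hp'⟩
  · constructor
    · dsimp only
      exact pvRes_init g
    · exact pvP_init g

-- the A port, rewritten through pvPass1/pvDP
lemma odd_square_patch_eq (lst : List (List Int)) :
    odd_square_patch lst
      = (pvDP (pvPass1 lst (fun x => PySem.Int.mod x 2) (PySem.List.pyGetD lst 0 []).length)
          lst.length (PySem.List.pyGetD lst 0 []).length).2 := by
  simp only [odd_square_patch, pvStepAB]
  rfl

-- ---------- B side ----------

lemma pvD_le (g : List (List Int)) (i j : Int) (h : 1 ≤ pvD g i j) :
    ((pvD g i j : Int) ≤ (g.length : Int)) ∧ ((pvD g i j : Int) ≤ ((g.headD []).length : Int)) := by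
  have hsq : pvSq g i j (pvD g i j) := (pvSq_iff_le_pvD' g (pvD g i j) i j).mpr (le_refl _)
  have h00 := hsq 0 0 (by omega) (by omega)
  have hk := hsq (pvD g i j - 1) (pvD g i j - 1) (by omega) (by omega)
  have b00 := pvOdd_bounds g _ _ h00
  have bk := pvOdd_bounds g _ _ hk
  constructor <;> omega

lemma pvFound_iff (g : List (List Int)) (hlen : ∀ r ∈ g, (g.headD []).length ≤ r.length)
    (k : Nat) (hk : 1 ≤ k) :
    (pvFound (pvPass1 g (fun x => PySem.Int.mod x 2) (g.headD []).length)
        (g.length : Int) ((g.headD []).length : Int) (k : Int) = true)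
      ↔ ∃ a b : Nat, a < g.length ∧ b < (g.headD []).length ∧ k ≤ pvD g (a : Int) (b : Int) := by
  unfold pvFound
  rw [List.any_eq_true]
  constructor
  · rintro ⟨i, hiMem, hrest⟩
    rw [PySem.List.mem_pyRange_one] at hiMem
    rw [List.any_eq_true] at hrest
    obtain ⟨j, hjMem, hall⟩ := hrest
    rw [PySem.List.mem_pyRange_one] at hjMem
    have hsq : pvSq g (i + (k : Int) - 1) (j + (k : Int) - 1) k := by
      intro x y hx hy
      have hxmem : ((k - 1 - x : Nat) : Int) ∈ PySem.List.pyRange 0 (k : Int) 1 := by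
        rw [PySem.List.mem_pyRange_one]; omega
      have hymem : ((k - 1 - y : Nat) : Int) ∈ PySem.List.pyRange 0 (k : Int) 1 := by
        rw [PySem.List.mem_pyRange_one]; omega
      rw [List.all_eq_true] at hall
      have h1 := hall _ hxmem
      rw [List.all_eq_true] at h1
      have h2 := h1 _ hymem
      have ea : i + ((k - 1 - x : Nat) : Int) = (((i + ((k - 1 - x : Nat) : Int)).toNat : Nat) : Int) := by omega
      have eb : j + ((k - 1 - y : Nat) : Int) = (((j + ((k - 1 - y : Nat) : Int)).toNat : Nat) : Int) := by omega
      rw [ea, eb] at h2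
      rw [pvClean_entry g hlen _ _ (by omega) (by omega)] at h2
      by_cases hodd : pvOdd g (((i + ((k - 1 - x : Nat) : Int)).toNat : Nat) : Int)
          (((j + ((k - 1 - y : Nat) : Int)).toNat : Nat) : Int) = true
      · have ex : i + (k : Int) - 1 - (x : Int) = (((i + ((k - 1 - x : Nat) : Int)).toNat : Nat) : Int) := by omega
        have ey : j + (k : Int) - 1 - (y : Int) = (((j + ((k - 1 - y : Nat) : Int)).toNat : Nat) : Int) := by omega
        rw [ex, ey]
        exact hodd
      · rw [if_neg hodd] at h2
        simp at h2
    have hle := (pvSq_iff_le_pvD' g k _ _).mp hsq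
    refine ⟨(i + (k : Int) - 1).toNat, (j + (k : Int) - 1).toNat, by omega, by omega, ?_⟩
    have ea : (((i + (k : Int) - 1).toNat : Nat) : Int) = i + (k : Int) - 1 := by omega
    have eb : (((j + (k : Int) - 1).toNat : Nat) : Int) = j + (k : Int) - 1 := by omega
    rw [ea, eb]
    exact hle
  · rintro ⟨a, b, ha, hb, hd⟩
    have hsq : pvSq g (a : Int) (b : Int) k := (pvSq_iff_le_pvD' g k _ _).mpr hd
    have hcorner := hsq (k - 1) (k - 1) (by omega) (by omega)
    have hbnd := pvOdd_bounds g _ _ hcorner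
    refine ⟨((a - (k - 1) : Nat) : Int), ?_, ?_⟩
    · rw [PySem.List.mem_pyRange_one]; omega
    · rw [List.any_eq_true]
      refine ⟨((b - (k - 1) : Nat) : Int), ?_, ?_⟩
      · rw [PySem.List.mem_pyRange_one]; omega
      · rw [List.all_eq_true]
        intro x hxMem
        rw [PySem.List.mem_pyRange_one] at hxMem
        rw [List.all_eq_true]
        intro y hyMem
        rw [PySem.List.mem_pyRange_one] at hyMem
        have hodd : pvOdd g (((a - (k - 1) + x.toNat : Nat) : Nat) : Int)
            (((b - (k - 1) + y.toNat : Nat) : Nat) : Int) = true := by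
          have := hsq (k - 1 - x.toNat) (k - 1 - y.toNat) (by omega) (by omega)
          have ex : (a : Int) - ((k - 1 - x.toNat : Nat) : Int) = ((a - (k - 1) + x.toNat : Nat) : Int) := by omega
          have ey : (b : Int) - ((k - 1 - y.toNat : Nat) : Int) = ((b - (k - 1) + y.toNat : Nat) : Int) := by omega
          rw [ex, ey] at this
          exact this
        have ex2 : ((a - (k - 1) : Nat) : Int) + x = ((a - (k - 1) + x.toNat : Nat) : Int) := by omega
        have ey2 : ((b - (k - 1) : Nat) : Int) + y = ((b - (k - 1) + y.toNat : Nat) : Int) := by omega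
        rw [ex2, ey2]
        rw [pvClean_entry g hlen _ _ (by omega) (by omega), if_pos hodd]
        simp

lemma pvSearch_run (L1 : List (List Int)) (R C : Int) (mx : Int)
    (_hmx0 : 0 ≤ mx) (hmxle : mx ≤ min R C)
    (hfound : ∀ k : Int, 1 ≤ k → k ≤ min R C → (pvFound L1 R C k = true ↔ k ≤ mx)) :
    ∀ (n : Nat) (k : Int), (min R C + 1 - k).toNat ≤ n → 1 ≤ k → k ≤ mx + 1 →
      pvSearch L1 R C k (k - 1) = mx := by
  intro n
  induction n with
  | zero =>
    intro k hn h1 h2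
    rw [pvSearch]
    rw [dif_neg (by omega)]
    omega
  | succ n ih =>
    intro k hn h1 h2
    rw [pvSearch]
    by_cases hc : k ≤ min R C
    · rw [dif_pos hc]
      by_cases hkm : k ≤ mx
      · rw [if_pos ((hfound k h1 hc).mpr hkm)]
        have h' := ih (k + 1) (by omega) (by omega) (by omega)
        simpa using h'
      · rw [if_neg (fun hh => hkm ((hfound k h1 hc).mp hh))]
        omega
    · rw [dif_neg hc]
      omega

lemma odd_square_patch_alt_eq (lst : List (List Int)) :
    odd_square_patch_alt lst
      = pvSearch (pvPass1 lst (fun x => PySem.Int.mod x 2) (PySem.List.pyGetD lst 0 []).length)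
          (lst.length : Int) ((PySem.List.pyGetD lst 0 []).length : Int) 1 0 := by
  simp only [odd_square_patch_alt]
  rfl

theorem odd_square_patch_spec : Claim_equal_odd_square_patch := by
  intro lst _ hpre
  obtain ⟨hne, hlen⟩ := hpre
  have hhead : PySem.List.pyGetD lst 0 [] = lst.headD [] := by
    cases lst with
    | nil => exact absurd rfl hne
    | cons a l => simp [PySem.List.pyGetD_zero_cons]
  unfold Spec_odd_square_patch
  rw [odd_square_patch_eq, odd_square_patch_alt_eq, hhead]
  obtain ⟨p0, p1, p2⟩ := pvDP_val lst hlen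
  set mx := (pvDP (pvPass1 lst (fun x => PySem.Int.mod x 2) (lst.headD []).length)
    lst.length (lst.headD []).length).2 with hmx
  have hmxle : mx ≤ min (lst.length : Int) ((lst.headD []).length : Int) := by
    rcases p2 with h0 | ⟨a, b, ha, hb, _, he⟩
    · omega
    · rw [← he]
      unfold pvDI
      by_cases h1 : 1 ≤ pvD lst (a : Int) (b : Int)
      · have := pvD_le lst (a : Int) (b : Int) h1
        omega
      · omega
  have hfound : ∀ k : Int, 1 ≤ k → k ≤ min (lst.length : Int) ((lst.headD []).length : Int) →
      (pvFound (pvPass1 lst (fun x => PySem.Int.mod x 2) (lst.headD []).length)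
        (lst.length : Int) ((lst.headD []).length : Int) k = true ↔ k ≤ mx) := by
    intro k h1 h2
    have ek : k = ((k.toNat : Nat) : Int) := by omega
    rw [ek, pvFound_iff lst hlen k.toNat (by omega)]
    constructor
    · rintro ⟨a, b, ha, hb, hd⟩
      have hle := p1 a b hb (Or.inl ha)
      unfold pvDI at hle
      omega
    · intro hkm
      rcases p2 with h0 | ⟨a, b, ha, hb, _, he⟩
      · omega
      · unfold pvDI at he
        exact ⟨a, b, ha, hb, by omega⟩
  have hrun := pvSearch_run (pvPass1 lst (fun x => PySem.Int.mod x 2) (lst.headD []).length)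
    (lst.length : Int) ((lst.headD []).length : Int) mx p0 hmxle hfound
    ((min (lst.length : Int) ((lst.headD []).length : Int) + 1 - 1).toNat) 1 (le_refl _)
    (by omega) (by omega)
  have e0 : (1 : Int) - 1 = 0 := by norm_num
  rw [e0] at hrun
  exact hrun.symm
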